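-- pv_equiv track=rewrite | github.com/dev-satyamjha/Python_Udemy_Course | Projects/PasswordChecker.py | missing_requirements
-- ===== SOURCE A (Python) =====
-- import string
--
-- def missing_requirements(password:str):
--     missing =[]
--
--     if not any(c.isupper() for c in password):
--         missing.append("Add an uppercase letter[A-Z]")
--     if not any(c in string.punctuation for c in password):
--         missing.append("Add a special character[@#!$%]")
--     if not any(c.isdigit() for c in password):
--         missing.append("Add a digit[0-9]")
--     if len(password) < 10:
--         missing.append("Add more characters")
--     return missing
-- ===== SOURCE B (Python) =====
-- import string
--
-- def missing_requirements(password: str):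
--     # Single pass over the password maintaining three boolean flags,
--     # breaking early once all requirements are seen.
--     has_upper = has_special = has_digit = False
--     for c in password:
--         if has_upper and has_special and has_digit:
--             break
--         if c.isupper():
--             has_upper = True
--         if c in string.punctuation:
--             has_special = True
--         if c.isdigit():
--             has_digit = True
--     missing = []
--     if not has_upper:
--         missing.append("Add an uppercase letter[A-Z]")
--     if not has_special:
--         missing.append("Add a special character[@#!$%]")
--     if not has_digit:
--         missing.append("Add a digit[0-9]")
--     if len(password) < 10:
--         missing.append("Add more characters")
--     return missing
-- ===== Notes on version B (the rewrite author's own statement) =====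
-- stated objective: faster
-- what changed: Replaces A's three separate any()-generator scans of the password with a single flag-maintaining pass (with early exit once all three flags are set), then assembles the missing-requirements list from the flags.
import Mathlib
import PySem

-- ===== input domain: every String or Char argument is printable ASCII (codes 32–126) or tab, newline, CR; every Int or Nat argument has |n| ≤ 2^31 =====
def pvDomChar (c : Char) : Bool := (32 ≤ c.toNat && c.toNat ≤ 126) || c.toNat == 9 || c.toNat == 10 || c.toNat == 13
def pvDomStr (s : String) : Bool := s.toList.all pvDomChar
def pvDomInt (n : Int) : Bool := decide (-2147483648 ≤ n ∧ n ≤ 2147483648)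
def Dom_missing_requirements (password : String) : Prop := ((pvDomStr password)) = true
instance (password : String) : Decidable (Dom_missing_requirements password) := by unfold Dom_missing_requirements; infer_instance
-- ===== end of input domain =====

-- B replaces A's three any()-scans with one flag-maintaining pass (early exit); return value identical.

-- string.punctuation
def pvPunct : List Char := "!\"#$%&'()*+,-./:;<=>?@[\\]^_`{|}~".toList

-- ===== PORT A =====
def missing_requirements (password : String) : List String :=
  let cs := password.toList
  let missing : List String := []
  let missing := if ¬ (cs.any PySem.Chars.isupper) then missing ++ ["Add an uppercase letter[A-Z]"] else missing
  let missing := if ¬ (cs.any (fun c => pvPunct.contains c)) then missing ++ ["Add a special character[@#!$%]"] else missing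
  let missing := if ¬ (cs.any PySem.Chars.isdigit) then missing ++ ["Add a digit[0-9]"] else missing
  let missing := if (PySem.Str.len password) < 10 then missing ++ ["Add more characters"] else missing
  missing

-- ===== PORT B =====
-- the for-loop of Source B: one pass keeping (has_upper, has_special, has_digit), breaking once all are true
def pvScanFlags : List Char → Bool → Bool → Bool → Bool × Bool × Bool
  | [], u, s, d => (u, s, d)
  | c :: rest, u, s, d =>
    if u && s && d then (u, s, d)
    else pvScanFlags rest (u || PySem.Chars.isupper c) (s || pvPunct.contains c) (d || PySem.Chars.isdigit c)

def missing_requirements_alt (password : String) : List String :=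
  let (hasUpper, hasSpecial, hasDigit) := pvScanFlags password.toList false false false
  let missing : List String := []
  let missing := if ¬ hasUpper then missing ++ ["Add an uppercase letter[A-Z]"] else missing
  let missing := if ¬ hasSpecial then missing ++ ["Add a special character[@#!$%]"] else missing
  let missing := if ¬ hasDigit then missing ++ ["Add a digit[0-9]"] else missing
  let missing := if (PySem.Str.len password) < 10 then missing ++ ["Add more characters"] else missing
  missing

-- ===== PRECONDITION & SPEC =====
def Spec_missing_requirements (password : String) (out : List String) : Prop := out = missing_requirements_alt password
instance (password : String) (out : List String) : Decidable (Spec_missing_requirements password out) := by unfold Spec_missing_requirements; infer_instance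

-- ===== CLAIM (what is proved, stated in full; the proofs are below) =====
def Claim_equal_missing_requirements : Prop := ∀ (password : String), Dom_missing_requirements password → Spec_missing_requirements password (missing_requirements password)

-- ===== LEMMAS AND PROOFS =====
theorem pvScanFlags_eq (cs : List Char) : ∀ (u s d : Bool),
    pvScanFlags cs u s d =
      (u || cs.any PySem.Chars.isupper,
       s || cs.any (fun c => pvPunct.contains c),
       d || cs.any PySem.Chars.isdigit) := by
  induction cs with
  | nil => intro u s d; simp [pvScanFlags]
  | cons c rest ih =>
    intro u s d
    by_cases h : (u && s && d) = true
    · simp only [Bool.and_eq_true] at h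
      obtain ⟨⟨hu, hs⟩, hd⟩ := h
      simp [pvScanFlags, hu, hs, hd]
    · simp only [pvScanFlags, h, ih, List.any_cons, Bool.or_assoc, Bool.false_eq_true, if_false]

-- ===== VERDICT (by name: the statement is the Claim_ definition above) =====
theorem missing_requirements_spec : Claim_equal_missing_requirements := by
  intro password _
  unfold Spec_missing_requirements missing_requirements missing_requirements_alt
  simp [pvScanFlags_eq]
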